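-- pv_equiv track=rewrite | github.com/skyc5423/eeg_analysis | abs_y_report.py | parse_band_ref
-- ===== SOURCE A (Python) =====
-- def parse_band_ref(feature_refs):
--     parsed_band_refs = {'Delta': [],
--                         'Theta': [],
--                         'Alpha': [],
--                         'Beta': [],
--                         'High Beta': [],
--                         'Gamma': []}
--     for ref in feature_refs:
--         if ref['band'] == 'Delta':
--             parsed_band_refs['Delta'].append(ref)
--         elif ref['band'] == 'Theta':
--             parsed_band_refs['Theta'].append(ref)
--         elif ref['band'] == 'Alpha':
--             parsed_band_refs['Alpha'].append(ref)
--         elif ref['band'] == 'Beta':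
--             parsed_band_refs['Beta'].append(ref)
--         elif ref['band'] == 'High Beta':
--             parsed_band_refs['High Beta'].append(ref)
--         elif ref['band'] == 'Gamma':
--             parsed_band_refs['Gamma'].append(ref)
--
--     return parsed_band_refs
-- ===== SOURCE B (Python) =====
-- def parse_band_ref(feature_refs):
--     bands = ['Delta', 'Theta', 'Alpha', 'Beta', 'High Beta', 'Gamma']
--     return {band: [ref for ref in feature_refs if ref['band'] == band]
--             for band in bands}
-- ===== Notes on version B (the rewrite author's own statement) =====
-- stated objective: simpler
-- what changed: Replaces the six-way elif dispatch loop that appends into a pre-built dict by a dict comprehension over the fixed band list, filtering feature_refs once per band.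
import Mathlib
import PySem

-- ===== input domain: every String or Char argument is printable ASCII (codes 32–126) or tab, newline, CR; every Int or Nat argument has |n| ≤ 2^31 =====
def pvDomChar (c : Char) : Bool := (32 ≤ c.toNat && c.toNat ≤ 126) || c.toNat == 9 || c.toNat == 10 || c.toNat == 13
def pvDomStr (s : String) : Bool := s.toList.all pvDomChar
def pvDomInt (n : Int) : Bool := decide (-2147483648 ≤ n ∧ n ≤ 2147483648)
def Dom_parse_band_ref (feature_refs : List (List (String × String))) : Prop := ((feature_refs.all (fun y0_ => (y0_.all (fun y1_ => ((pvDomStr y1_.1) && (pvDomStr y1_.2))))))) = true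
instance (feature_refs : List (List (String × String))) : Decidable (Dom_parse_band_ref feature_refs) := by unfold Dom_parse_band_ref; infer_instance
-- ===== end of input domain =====

-- B replaces A's six-way elif dispatch loop by a map over the fixed band list with one filter per band (simpler decomposition, same results).


-- ===== PORT A =====
-- ref['band'] (inside Pre_ the key is present, so the default is never used)
def pvBandOf (ref : List (String × String)) : String := (PySem.Dict.mk ref).getD "band" ""

-- loop body of A: the elif chain appending ref to the matching band's list
def pvStepA (d : PySem.Dict String (List (List (String × String)))) (ref : List (String × String)) :
    PySem.Dict String (List (List (String × String))) :=
  if pvBandOf ref = "Delta" then d.modify "Delta" [] (· ++ [ref])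
  else if pvBandOf ref = "Theta" then d.modify "Theta" [] (· ++ [ref])
  else if pvBandOf ref = "Alpha" then d.modify "Alpha" [] (· ++ [ref])
  else if pvBandOf ref = "Beta" then d.modify "Beta" [] (· ++ [ref])
  else if pvBandOf ref = "High Beta" then d.modify "High Beta" [] (· ++ [ref])
  else if pvBandOf ref = "Gamma" then d.modify "Gamma" [] (· ++ [ref])
  else d

def parse_band_ref (feature_refs : List (List (String × String))) : List (String × List (List (String × String))) :=
  (feature_refs.foldl pvStepA
    (PySem.Dict.ofList [("Delta", []), ("Theta", []), ("Alpha", []), ("Beta", []), ("High Beta", []), ("Gamma", [])])).items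

-- ===== PORT B =====
def pvBands : List String := ["Delta", "Theta", "Alpha", "Beta", "High Beta", "Gamma"]

def parse_band_ref_alt (feature_refs : List (List (String × String))) : List (String × List (List (String × String))) :=
  pvBands.map (fun band => (band, feature_refs.filter (fun ref => pvBandOf ref == band)))

-- ===== PRECONDITION & SPEC =====
-- Pre_ excludes refs without a 'band' key, on which Python A (and B) raise KeyError.
def Pre_parse_band_ref (feature_refs : List (List (String × String))) : Prop :=
  feature_refs.all (fun ref => ref.any (fun p => p.1 == "band")) = true
instance (feature_refs : List (List (String × String))) : Decidable (Pre_parse_band_ref feature_refs) := by unfold Pre_parse_band_ref; infer_instance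
def pvWitness_parse_band_ref : (List (List (String × String))) := [[("band", "Delta")], [("band", "Gamma"), ("ch", "F3")]]

def Spec_parse_band_ref (feature_refs : List (List (String × String))) (out : List (String × List (List (String × String)))) : Prop := out = parse_band_ref_alt feature_refs
instance (feature_refs : List (List (String × String))) (out : List (String × List (List (String × String)))) : Decidable (Spec_parse_band_ref feature_refs out) := by unfold Spec_parse_band_ref; infer_instance

-- ===== CLAIM (what is proved, stated in full; the proofs are below) =====
def Claim_equal_parse_band_ref : Prop := ∀ (feature_refs : List (List (String × String))), Dom_parse_band_ref feature_refs → Pre_parse_band_ref feature_refs → Spec_parse_band_ref feature_refs (parse_band_ref feature_refs)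

-- ===== LEMMAS AND PROOFS =====

-- invariant of A's loop: starting from the six bands holding v1..v6, the fold appends exactly the refs filtered per band
lemma pvFoldA_items (refs : List (List (String × String))) :
    ∀ v1 v2 v3 v4 v5 v6 : List (List (String × String)),
    (refs.foldl pvStepA
      (PySem.Dict.mk [("Delta", v1), ("Theta", v2), ("Alpha", v3), ("Beta", v4), ("High Beta", v5), ("Gamma", v6)])).items
    = [("Delta", v1 ++ refs.filter (fun r => pvBandOf r == "Delta")),
       ("Theta", v2 ++ refs.filter (fun r => pvBandOf r == "Theta")),
       ("Alpha", v3 ++ refs.filter (fun r => pvBandOf r == "Alpha")),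
       ("Beta", v4 ++ refs.filter (fun r => pvBandOf r == "Beta")),
       ("High Beta", v5 ++ refs.filter (fun r => pvBandOf r == "High Beta")),
       ("Gamma", v6 ++ refs.filter (fun r => pvBandOf r == "Gamma"))] := by
  induction refs with
  | nil => intro v1 v2 v3 v4 v5 v6; simp
  | cons r rs ih =>
    intro v1 v2 v3 v4 v5 v6
    simp only [List.foldl_cons]
    by_cases h1 : pvBandOf r = "Delta"
    · have e : pvStepA (PySem.Dict.mk [("Delta", v1), ("Theta", v2), ("Alpha", v3), ("Beta", v4), ("High Beta", v5), ("Gamma", v6)]) r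
          = PySem.Dict.mk [("Delta", v1 ++ [r]), ("Theta", v2), ("Alpha", v3), ("Beta", v4), ("High Beta", v5), ("Gamma", v6)] := by
        rw [pvStepA]; rw [if_pos h1]; rfl
      rw [e, ih]
      simp [h1]
    by_cases h2 : pvBandOf r = "Theta"
    · have e : pvStepA (PySem.Dict.mk [("Delta", v1), ("Theta", v2), ("Alpha", v3), ("Beta", v4), ("High Beta", v5), ("Gamma", v6)]) r
          = PySem.Dict.mk [("Delta", v1), ("Theta", v2 ++ [r]), ("Alpha", v3), ("Beta", v4), ("High Beta", v5), ("Gamma", v6)] := by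
        rw [pvStepA]; rw [if_neg h1]; rw [if_pos h2]; rfl
      rw [e, ih]
      simp [h2]
    by_cases h3 : pvBandOf r = "Alpha"
    · have e : pvStepA (PySem.Dict.mk [("Delta", v1), ("Theta", v2), ("Alpha", v3), ("Beta", v4), ("High Beta", v5), ("Gamma", v6)]) r
          = PySem.Dict.mk [("Delta", v1), ("Theta", v2), ("Alpha", v3 ++ [r]), ("Beta", v4), ("High Beta", v5), ("Gamma", v6)] := by
        rw [pvStepA]; rw [if_neg h1]; rw [if_neg h2]; rw [if_pos h3]; rfl
      rw [e, ih]
      simp [h3]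
    by_cases h4 : pvBandOf r = "Beta"
    · have e : pvStepA (PySem.Dict.mk [("Delta", v1), ("Theta", v2), ("Alpha", v3), ("Beta", v4), ("High Beta", v5), ("Gamma", v6)]) r
          = PySem.Dict.mk [("Delta", v1), ("Theta", v2), ("Alpha", v3), ("Beta", v4 ++ [r]), ("High Beta", v5), ("Gamma", v6)] := by
        rw [pvStepA]; rw [if_neg h1]; rw [if_neg h2]; rw [if_neg h3]; rw [if_pos h4]; rfl
      rw [e, ih]
      simp [h4]
    by_cases h5 : pvBandOf r = "High Beta"
    · have e : pvStepA (PySem.Dict.mk [("Delta", v1), ("Theta", v2), ("Alpha", v3), ("Beta", v4), ("High Beta", v5), ("Gamma", v6)]) r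
          = PySem.Dict.mk [("Delta", v1), ("Theta", v2), ("Alpha", v3), ("Beta", v4), ("High Beta", v5 ++ [r]), ("Gamma", v6)] := by
        rw [pvStepA]; rw [if_neg h1]; rw [if_neg h2]; rw [if_neg h3]; rw [if_neg h4]; rw [if_pos h5]; rfl
      rw [e, ih]
      simp [h5]
    by_cases h6 : pvBandOf r = "Gamma"
    · have e : pvStepA (PySem.Dict.mk [("Delta", v1), ("Theta", v2), ("Alpha", v3), ("Beta", v4), ("High Beta", v5), ("Gamma", v6)]) r
          = PySem.Dict.mk [("Delta", v1), ("Theta", v2), ("Alpha", v3), ("Beta", v4), ("High Beta", v5), ("Gamma", v6 ++ [r])] := by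
        rw [pvStepA]; rw [if_neg h1]; rw [if_neg h2]; rw [if_neg h3]; rw [if_neg h4]; rw [if_neg h5]; rw [if_pos h6]; rfl
      rw [e, ih]
      simp [h6]
    · have e : pvStepA (PySem.Dict.mk [("Delta", v1), ("Theta", v2), ("Alpha", v3), ("Beta", v4), ("High Beta", v5), ("Gamma", v6)]) r
          = PySem.Dict.mk [("Delta", v1), ("Theta", v2), ("Alpha", v3), ("Beta", v4), ("High Beta", v5), ("Gamma", v6)] := by
        rw [pvStepA]; rw [if_neg h1]; rw [if_neg h2]; rw [if_neg h3]; rw [if_neg h4]; rw [if_neg h5]; rw [if_neg h6]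
      rw [e, ih]
      simp [h1, h2, h3, h4, h5, h6]

theorem parse_band_ref_spec : Claim_equal_parse_band_ref := by
  intro feature_refs _ _
  unfold Spec_parse_band_ref parse_band_ref parse_band_ref_alt pvBands
  rw [show PySem.Dict.ofList [("Delta", ([] : List (List (String × String)))), ("Theta", []), ("Alpha", []), ("Beta", []), ("High Beta", []), ("Gamma", [])]
      = PySem.Dict.mk [("Delta", []), ("Theta", []), ("Alpha", []), ("Beta", []), ("High Beta", []), ("Gamma", [])] from rfl]
  rw [pvFoldA_items]
  simp
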